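-- pv_equiv track=rewrite | github.com/azril773/payroll_app | payroll_app/controllers/lib.py | fmkerja_k
-- ===== SOURCE A (Python) =====
-- def fmkerja_k(masa):
--     pl = []
--
--     for m in range(1,masa+1):
--         if m % 5 == 0:
--             pl.append(m+1)
--
--     if not pl:
--         tunjangan = 5000*masa
--     else:
--
--         mpl = max(pl)
--
--         if masa not in pl:
--             if masa < mpl:
--                 jkelipatan = len(pl) - 1
--                 penambah = jkelipatan*5000
--                 tunjangan = (masa * 5000)+penambah
--             else:
--                 jkelipatan = len(pl)
--                 penambah = jkelipatan*5000
--                 tunjangan = (masa * 5000)+penambah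
--
--         else:
--             jkelipatan = len(pl)
--             penambah = jkelipatan*5000
--             tunjangan = (5000*masa)+penambah
--
--     data = int(tunjangan)
--     return data
-- ===== SOURCE B (Python) =====
-- def fmkerja_k(masa):
--     # Closed form: allowance is 5000 per month plus 5000 per completed 5-month
--     # block, except that an exact multiple of 5 does not yet count its own block.
--     if masa < 5:
--         return 5000 * masa
--     q, r = divmod(masa, 5)
--     return 5000 * (masa + q - (1 if r == 0 else 0))
-- ===== Notes on version B (the rewrite author's own statement) =====
-- stated objective: faster
-- what changed: Replaces the O(masa) loop that materialises the list of 5-multiples (plus max/membership scans over it) with O(1) closed-form arithmetic using divmod(masa, 5).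
import Mathlib
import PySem

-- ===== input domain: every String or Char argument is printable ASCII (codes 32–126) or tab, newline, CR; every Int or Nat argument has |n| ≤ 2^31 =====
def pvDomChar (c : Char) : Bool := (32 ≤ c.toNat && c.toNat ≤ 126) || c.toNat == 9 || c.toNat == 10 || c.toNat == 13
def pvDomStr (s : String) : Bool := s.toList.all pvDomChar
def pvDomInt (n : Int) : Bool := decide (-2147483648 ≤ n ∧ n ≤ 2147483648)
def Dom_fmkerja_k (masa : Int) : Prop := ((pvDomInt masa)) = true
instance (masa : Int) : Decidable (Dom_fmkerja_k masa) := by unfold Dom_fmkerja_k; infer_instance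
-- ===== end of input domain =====

-- B replaces A's O(masa) list-building loop by O(1) closed-form arithmetic (same return value).

-- ===== PORT A =====
-- literal transliteration: pl = [m+1 for m in range(1, masa+1) if m % 5 == 0],
-- then branch on emptiness, max(pl) and membership exactly as A does
def fmkerja_k (masa : Int) : Int :=
  let pl : List Int :=
    (PySem.List.pyRange 1 (masa + 1)).foldl
      (fun acc m => if PySem.Int.mod m 5 == 0 then acc ++ [m + 1] else acc) []
  if pl = [] then 5000 * masa
  else if masa ∉ pl then
    -- mpl = max(pl); pl ≠ [] in this branch, so max? is some
    (if masa < (PySem.List.max? pl (fun y => y)).getD 0 then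
      masa * 5000 + ((pl.length : Int) - 1) * 5000   -- jkelipatan = len(pl)-1
    else
      masa * 5000 + (pl.length : Int) * 5000)        -- jkelipatan = len(pl)
  else
    5000 * masa + (pl.length : Int) * 5000           -- jkelipatan = len(pl)

-- ===== PORT B =====
def fmkerja_k_alt (masa : Int) : Int :=
  if masa < 5 then 5000 * masa
  else 5000 * (masa + PySem.Int.floordiv masa 5
               - (if PySem.Int.mod masa 5 = 0 then 1 else 0))

-- ===== PRECONDITION & SPEC =====
def Spec_fmkerja_k (masa : Int) (out : Int) : Prop := out = fmkerja_k_alt masa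
instance (masa : Int) (out : Int) : Decidable (Spec_fmkerja_k masa out) := by unfold Spec_fmkerja_k; infer_instance

-- ===== CLAIM (what is proved, stated in full; the proofs are below) =====
def Claim_equal_fmkerja_k : Prop := ∀ (masa : Int), Dom_fmkerja_k masa → Spec_fmkerja_k masa (fmkerja_k masa)

-- ===== LEMMAS AND PROOFS =====

-- pvG k is the (k+1)-st element of A's list pl: m = 5*(k+1) contributes m+1
def pvG (k : Nat) : Int := 5 * ((k : Int) + 1) + 1

-- pl, characterised: for masa = n ≥ 0, pl = [pvG 0, …, pvG (n/5 - 1)]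
lemma pv_pl_spec (n : Nat) :
    (((PySem.List.pyRange 1 ((n : Int) + 1)).filter
        (fun m => PySem.Int.mod m 5 == 0)).map (fun m => m + 1))
      = (List.range (n / 5)).map pvG := by
  induction n with
  | zero =>
      rw [show ((0 : Nat) : Int) + 1 = 1 by norm_num,
          PySem.List.pyRange_one_eq_nil le_rfl]
      rfl
  | succ n ih =>
      have hsplit : PySem.List.pyRange 1 ((n : Int) + 1 + 1)
          = PySem.List.pyRange 1 ((n : Int) + 1) ++ [(n : Int) + 1] :=
        PySem.List.pyRange_one_succ_right (by omega)
      have hcast : ((n + 1 : Nat) : Int) + 1 = (n : Int) + 1 + 1 := by push_cast; ring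
      rw [hcast, hsplit, List.filter_append, List.map_append, ih]
      have hmod : PySem.Int.mod ((n : Int) + 1) 5 = (((n + 1) % 5 : Nat) : Int) := by
        exact_mod_cast PySem.Int.mod_natCast (n + 1) 5
      by_cases h5 : (n + 1) % 5 = 0
      · have hb : ((((n + 1) % 5 : Nat) : Int) == 0) = true := by
          simp only [beq_iff_eq]; exact_mod_cast h5
        have hq : (n + 1) / 5 = n / 5 + 1 := by omega
        rw [hq, List.range_succ, List.map_append]
        simp only [List.filter_cons, List.filter_nil, hmod, hb, if_true,
          List.map_cons, List.map_nil]
        have : (n : Int) + 1 + 1 = pvG (n / 5) := by unfold pvG; push_cast; omega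
        rw [this]
      · have hb : ((((n + 1) % 5 : Nat) : Int) == 0) = false := by
          simp only [beq_eq_false_iff_ne, ne_eq]
          intro h; exact h5 (by exact_mod_cast h)
        have hq : (n + 1) / 5 = n / 5 := by omega
        rw [hq]
        simp only [List.filter_cons, List.filter_nil, hmod, hb, Bool.false_eq_true,
          if_false, List.map_nil, List.append_nil]

-- max(pl) is the last element of pl (pvG is strictly increasing)
lemma pv_max_pl (q : Nat) :
    PySem.List.max? ((List.range (q + 1)).map pvG) (fun y => y) = some (pvG q) := by
  induction q with
  | zero => rfl
  | succ q ih =>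
      obtain ⟨t, ht⟩ : ∃ t, (List.range (q + 1)).map pvG = pvG 0 :: t :=
        ⟨((List.range q).map Nat.succ).map pvG, by
          rw [List.range_succ_eq_map, List.map_cons]⟩
      have h1 : (List.range (q + 1 + 1)).map pvG = pvG 0 :: (t ++ [pvG (q + 1)]) := by
        rw [List.range_succ, List.map_append, ht]; rfl
      rw [h1, PySem.List.max?_id_cons]
      rw [ht, PySem.List.max?_id_cons] at ih
      have hfold : List.foldl max (pvG 0) t = pvG q := Option.some.inj ih
      rw [List.foldl_append, hfold]
      simp only [List.foldl_cons, List.foldl_nil]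
      rw [max_eq_right (show pvG q ≤ pvG (q + 1) by unfold pvG; push_cast; omega)]

lemma pv_mem_pl (n q : Nat) :
    ((n : Int) ∈ (List.range q).map pvG) ↔ ∃ k, k < q ∧ n = 5 * (k + 1) + 1 := by
  simp only [List.mem_map, List.mem_range]
  constructor
  · rintro ⟨k, hk, hg⟩
    exact ⟨k, hk, by unfold pvG at hg; omega⟩
  · rintro ⟨k, hk, hn⟩
    exact ⟨k, hk, by unfold pvG; omega⟩

-- the main equality for masa ≥ 0, written as a Nat cast
lemma pv_main_nat (n : Nat) : fmkerja_k (n : Int) = fmkerja_k_alt (n : Int) := by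
  have hfd : PySem.Int.floordiv (n : Int) 5 = ((n / 5 : Nat) : Int) :=
    PySem.Int.floordiv_natCast n 5
  have hmd : PySem.Int.mod (n : Int) 5 = ((n % 5 : Nat) : Int) :=
    PySem.Int.mod_natCast n 5
  unfold fmkerja_k fmkerja_k_alt
  rw [PySem.List.foldl_append_if (fun m => PySem.Int.mod m 5 == 0) (fun m => m + 1)
        (PySem.List.pyRange 1 ((n : Int) + 1)) []]
  simp only [List.nil_append]
  rw [pv_pl_spec n, hfd, hmd]
  by_cases hlt : n < 5
  · -- q = 0: pl is empty, both sides give 5000 * masa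
    have hq : n / 5 = 0 := by omega
    rw [hq]
    simp only [List.range_zero, List.map_nil]
    rw [if_pos trivial, if_pos (show (n : Int) < 5 by exact_mod_cast hlt)]
  · have hq1 : 1 ≤ n / 5 := by omega
    obtain ⟨q', hq'⟩ : ∃ q', n / 5 = q' + 1 := ⟨n / 5 - 1, by omega⟩
    have hne : (List.range (n / 5)).map pvG ≠ [] := by
      simp [hq', List.range_succ]
    rw [if_neg hne, if_neg (show ¬ (n : Int) < 5 by exact_mod_cast hlt)]
    have hmax : (PySem.List.max? ((List.range (n / 5)).map pvG) (fun y => y)).getD 0 = pvG q' := by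
      rw [hq', pv_max_pl]; rfl
    have hlen : (((List.range (n / 5)).map pvG).length : Int) = ((n / 5 : Nat) : Int) := by
      simp
    by_cases hmem : (n : Int) ∈ (List.range (n / 5)).map pvG
    · -- masa in pl: n % 5 = 1 and n ≥ 6
      obtain ⟨k, hk, hn⟩ := (pv_mem_pl n (n / 5)).mp hmem
      have hr : n % 5 ≠ 0 := by omega
      rw [if_neg (not_not_intro hmem), hlen,
          if_neg (show ¬ (((n % 5 : Nat) : Int) = 0) by exact_mod_cast hr)]
      omega
    · rw [if_pos hmem, hmax, hlen]
      have hnot : ¬ ∃ k, k < n / 5 ∧ n = 5 * (k + 1) + 1 := by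
        intro h; exact hmem ((pv_mem_pl n (n / 5)).mpr h)
      by_cases hr : n % 5 = 0
      · -- n is a multiple of 5: n < mpl = 5*(n/5) + 1 = n + 1
        have hlt' : (n : Int) < pvG q' := by unfold pvG; omega
        rw [if_pos hlt',
            if_pos (show (((n % 5 : Nat) : Int) = 0) by exact_mod_cast hr)]
        omega
      · have hr1 : n % 5 ≠ 1 := by
          intro h1
          exact hnot ⟨n / 5 - 1, by omega, by omega⟩
        have hge : ¬ ((n : Int) < pvG q') := by unfold pvG; omega
        rw [if_neg hge,
            if_neg (show ¬ (((n % 5 : Nat) : Int) = 0) by exact_mod_cast hr)]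
        omega

lemma pv_neg (masa : Int) (h : masa < 0) : fmkerja_k masa = fmkerja_k_alt masa := by
  unfold fmkerja_k fmkerja_k_alt
  rw [PySem.List.pyRange_one_eq_nil (by omega : masa + 1 ≤ 1)]
  simp only [List.foldl_nil]
  rw [if_pos trivial, if_pos (by omega : masa < 5)]

-- ===== VERDICT (by name: the statement is the Claim_ definition above) =====
theorem fmkerja_k_spec : Claim_equal_fmkerja_k := by
  intro masa _
  unfold Spec_fmkerja_k
  by_cases h : masa < 0
  · exact pv_neg masa h
  · obtain ⟨n, rfl⟩ : ∃ n : Nat, masa = (n : Int) := ⟨masa.toNat, by omega⟩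
    exact pv_main_nat n
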